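-- pv_equiv track=rewrite | github.com/snowxzf/semantic_similarity | synonyms.py | per_sentence_dict
-- ===== SOURCE A (Python) =====
-- def per_sentence_dict(sentence):
--     d_main={}
--     for word in sentence:
--         if not word in d_main:
--             d_main[word] = {}
--         d_perword = {}
--         for word2 in sentence:
--             if word == word2:
--                 pass
--             #setence = dog cat cat
--             elif not word2 in d_perword:
--                 d_perword[word2]=1
--             else:
--                 d_perword[word2]+=1
--         if d_main[word] == {}:
--             d_main[word] = d_perword
--     return d_main
-- ===== SOURCE B (Python) =====
-- def per_sentence_dict(sentence):
--     counts = {}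
--     for w in sentence:
--         counts[w] = counts.get(w, 0) + 1
--     items = list(counts.items())
--     return {w: {w2: c for w2, c in items if w2 != w} for w in counts}
-- ===== Notes on version B (the rewrite author's own statement) =====
-- stated objective: faster
-- what changed: B builds one Counter-style dict in a single pass and derives each word's per-word dict by filtering the counter's items, replacing A's nested rescan of the whole sentence for every word (O(n^2) -> O(n + d^2) for d distinct words).
import Mathlib
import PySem

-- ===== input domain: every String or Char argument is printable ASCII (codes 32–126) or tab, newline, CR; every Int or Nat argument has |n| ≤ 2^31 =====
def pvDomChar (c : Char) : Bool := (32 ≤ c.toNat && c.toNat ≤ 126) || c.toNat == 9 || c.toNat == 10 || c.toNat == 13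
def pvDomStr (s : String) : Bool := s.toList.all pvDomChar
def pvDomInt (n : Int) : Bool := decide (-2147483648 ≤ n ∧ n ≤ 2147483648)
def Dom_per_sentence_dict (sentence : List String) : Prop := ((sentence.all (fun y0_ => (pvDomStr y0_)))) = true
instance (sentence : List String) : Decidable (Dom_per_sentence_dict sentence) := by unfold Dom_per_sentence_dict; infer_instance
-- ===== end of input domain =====

-- B replaces A's per-word rescan of the whole sentence by one counting pass plus a filter of the
-- counter's items per distinct word (objective: faster).

-- ===== PORT A =====
-- literal transliteration of A; `d_main[word] == {}` is Python dict equality with the empty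
-- dict, which holds exactly when the items list is empty.
def per_sentence_dict (sentence : List String) : List (String × List (String × Int)) :=
  let d_main : PySem.Dict String (PySem.Dict String Int) :=
    sentence.foldl (fun d_main word =>
      let d_main := if d_main.contains word then d_main else d_main.insert word PySem.Dict.empty
      let d_perword : PySem.Dict String Int :=
        sentence.foldl (fun d_perword word2 =>
          if word == word2 then d_perword
          else if !(d_perword.contains word2) then d_perword.insert word2 1
          else d_perword.insert word2 (d_perword.getD word2 0 + 1)) PySem.Dict.empty
      if (d_main.getD word PySem.Dict.empty).items = [] then d_main.insert word d_perword
      else d_main) PySem.Dict.empty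
  d_main.items.map (fun p => (p.1, p.2.items))

-- ===== PORT B =====
-- literal transliteration of Source B; the inner dict comprehension ranges over the counter's items,
-- whose keys are distinct, so it is exactly a filter of that items list.
def per_sentence_dict_alt (sentence : List String) : List (String × List (String × Int)) :=
  let counts : PySem.Dict String Int :=
    sentence.foldl (fun c w => c.insert w (c.getD w 0 + 1)) PySem.Dict.empty
  let items := counts.items
  counts.keys.map (fun w => (w, items.filter (fun q => !(q.1 == w))))

-- ===== PRECONDITION & SPEC =====
def Spec_per_sentence_dict (sentence : List String) (out : List (String × List (String × Int))) : Prop := out = per_sentence_dict_alt sentence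
instance (sentence : List String) (out : List (String × List (String × Int))) : Decidable (Spec_per_sentence_dict sentence out) := by unfold Spec_per_sentence_dict; infer_instance

-- ===== CLAIM (what is proved, stated in full; the proofs are below) =====
def Claim_equal_per_sentence_dict : Prop := ∀ (sentence : List String), Dom_per_sentence_dict sentence → Spec_per_sentence_dict sentence (per_sentence_dict sentence)

-- ===== LEMMAS AND PROOFS =====

-- the counting step B uses (and A's inner loop reduces to, once `not in` is simplified away)
def cntStep (c : PySem.Dict String Int) (w : String) : PySem.Dict String Int :=
  c.insert w (c.getD w 0 + 1)

def cnt (xs : List String) : PySem.Dict String Int := xs.foldl cntStep PySem.Dict.empty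

-- A's inner-loop body, with the word being skipped fixed
def innerStep (word : String) (c : PySem.Dict String Int) (w2 : String) : PySem.Dict String Int :=
  if word == w2 then c
  else if !(c.contains w2) then c.insert w2 1
  else c.insert w2 (c.getD w2 0 + 1)

-- A's inner dict for a given word
def innerA (s : List String) (word : String) : PySem.Dict String Int :=
  s.foldl (innerStep word) PySem.Dict.empty

-- A's outer-loop body
def outerStep (s : List String) (d_main : PySem.Dict String (PySem.Dict String Int)) (word : String) :
    PySem.Dict String (PySem.Dict String Int) :=
  let d_main := if d_main.contains word then d_main else d_main.insert word PySem.Dict.empty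
  if (d_main.getD word PySem.Dict.empty).items = [] then d_main.insert word (innerA s word)
  else d_main

lemma innerStep_eq (word : String) (c : PySem.Dict String Int) (w2 : String) :
    innerStep word c w2 = if word == w2 then c else cntStep c w2 := by
  unfold innerStep cntStep
  by_cases h : word == w2
  · simp [h]
  · cases hc : c.contains w2
    · simp [h, PySem.Dict.getD_of_not_contains c 0 hc]
    · simp [h]

-- skipping inside the fold = folding over the filtered list
lemma foldl_skip {α β : Type} (f : α → β → α) (p : β → Bool) :
    ∀ (xs : List β) (init : α),
      xs.foldl (fun a x => if p x then a else f a x) init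
        = (xs.filter (fun x => !(p x))).foldl f init := by
  intro xs
  induction xs with
  | nil => intro init; rfl
  | cons x xs ih =>
    intro init
    by_cases h : p x <;> simp [h, ih]

lemma innerA_eq_cnt_filter (s : List String) (word : String) :
    innerA s word = cnt (s.filter (fun w2 => !(word == w2))) := by
  unfold innerA cnt
  have : ∀ c w2, innerStep word c w2 = (fun c w2 => if word == w2 then c else cntStep c w2) c w2 :=
    innerStep_eq word
  rw [funext (fun c => funext (fun w2 => this c w2))]
  exact foldl_skip cntStep (fun w2 => word == w2) s PySem.Dict.empty

-- dedup of a snoc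
lemma dedup_append_singleton (xs : List String) (x : String) :
    PySem.List.dedup (xs ++ [x])
      = if x ∈ xs then PySem.List.dedup xs else PySem.List.dedup xs ++ [x] := by
  simp only [PySem.List.dedup, PySem.Set.ofList, List.foldl_append, List.foldl_cons, List.foldl_nil,
    PySem.Set.add, PySem.Set.contains]
  have hmem : (List.foldl PySem.Set.add PySem.Set.empty xs).contains x = decide (x ∈ xs) := by
    have := PySem.List.mem_dedup xs x
    simp [PySem.List.dedup, PySem.Set.ofList] at this
    simp [PySem.Set.contains, this]
  simp [PySem.Set.contains] at hmem
  by_cases h : x ∈ xs <;> simp [h, hmem]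

-- counter characterization: items are the distinct words (first-occurrence order) with counts
lemma cnt_items (xs : List String) :
    (cnt xs).items = (PySem.List.dedup xs).map (fun k => (k, (xs.count k : Int))) := by
  induction xs using List.reverseRecOn with
  | nil => rfl
  | append_singleton xs x ih =>
    have hnodup : (cnt xs).keys.Nodup := by
      have hkeys : (cnt xs).keys = PySem.List.dedup xs := by
        simp only [PySem.Dict.keys, ih, List.map_map]
        rw [show ((fun x : String × Int => x.1) ∘ fun k => (k, (xs.count k : Int))) = id from rfl,
          List.map_id]
      rw [hkeys]; exact PySem.List.nodup_dedup xs
    have hcont : (cnt xs).contains x = decide (x ∈ xs) := by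
      rw [Bool.eq_iff_iff]
      simp [PySem.Dict.contains, ih, List.any_eq_true]
    have hstep : cnt (xs ++ [x]) = cntStep (cnt xs) x := by
      simp [cnt, List.foldl_append]
    rw [hstep, dedup_append_singleton]
    by_cases h : x ∈ xs
    · have hc : (cnt xs).contains x = true := by simp [hcont, h]
      have hgd : (cnt xs).getD x 0 = (xs.count x : Int) := by
        apply PySem.Dict.getD_of_mem_items (cnt xs) _ hnodup
        rw [ih]
        exact List.mem_map_of_mem (by rwa [PySem.List.mem_dedup])
      simp only [cntStep, PySem.Dict.insert, hc, hgd, ih, h, if_pos]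
      rw [List.map_map]
      refine List.map_congr_left ?_
      intro k hk
      by_cases hkx : k = x
      · subst hkx
        simp [List.count_append]
      · have : (k == x) = false := by simp [hkx]
        simp [Function.comp, this, List.count_append, Ne.symm hkx]
    · have hc : (cnt xs).contains x = false := by simp [hcont, h]
      have hgd : (cnt xs).getD x 0 = 0 := PySem.Dict.getD_of_not_contains _ _ hc
      simp only [cntStep, PySem.Dict.insert, hc, hgd, ih, h, if_neg, Bool.false_eq_true,
        not_false_iff]
      rw [List.map_append]
      congr 1
      · refine List.map_congr_left ?_
        intro k hk
        have hkx : k ≠ x := by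
          rw [PySem.List.mem_dedup] at hk
          rintro rfl; exact h hk
        simp [List.count_append, Ne.symm hkx]
      · simp [List.count_append, List.count_eq_zero_of_not_mem h]

lemma cnt_keys (xs : List String) : (cnt xs).keys = PySem.List.dedup xs := by
  simp only [PySem.Dict.keys, cnt_items, List.map_map]
  rw [show ((fun x : String × Int => x.1) ∘ fun k => (k, (xs.count k : Int))) = id from rfl,
    List.map_id]

lemma dedup_filter (p : String → Bool) (xs : List String) :
    PySem.List.dedup (xs.filter p) = (PySem.List.dedup xs).filter p := by
  induction xs using List.reverseRecOn with
  | nil => rfl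
  | append_singleton xs x ih =>
    rw [List.filter_append, dedup_append_singleton]
    by_cases hp : p x
    · simp only [hp, List.filter_cons, List.filter_nil, if_true]
      rw [dedup_append_singleton, ih]
      by_cases h : x ∈ xs
      · simp [h, List.mem_filter, hp]
      · simp [h, List.mem_filter, hp, List.filter_append]
    · simp only [hp, List.filter_cons, List.filter_nil]
      by_cases h : x ∈ xs
      · simp only [h, if_true]
        simpa using ih
      · simp only [h, if_false, List.filter_append, List.filter_cons, hp]
        simpa using ih

-- the per-word lists agree: A's inner dict is the counter's items with the key word filtered out
lemma perword_eq (s : List String) (w : String) :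
    (innerA s w).items = (cnt s).items.filter (fun q => !(q.1 == w)) := by
  rw [innerA_eq_cnt_filter, cnt_items, cnt_items, dedup_filter, List.filter_map]
  have hpred : ((fun q : String × Int => !(q.1 == w)) ∘ fun k => (k, (s.count k : Int)))
      = fun w2 => !(w2 == w) := rfl
  rw [hpred]
  have hfil : (PySem.List.dedup s).filter (fun w2 => !(w == w2))
      = (PySem.List.dedup s).filter (fun w2 => !(w2 == w)) := by
    refine List.filter_congr ?_
    intro k _
    simp [BEq.comm]
  rw [hfil]
  refine List.map_congr_left ?_
  intro k hk
  rw [List.mem_filter] at hk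
  have hkw : k ≠ w := by simpa using hk.2
  have : (fun w2 => !(w == w2)) k = true := by simpa using (Ne.symm hkw)
  rw [List.count_filter (p := fun w2 => !(w == w2)) this]

-- A's outer loop: one entry per distinct word, mapped to its inner dict
lemma outer_items (s : List String) : ∀ xs : List String,
    (xs.foldl (outerStep s) PySem.Dict.empty).items
      = (PySem.List.dedup xs).map (fun w => (w, innerA s w)) := by
  intro xs
  induction xs using List.reverseRecOn with
  | nil => rfl
  | append_singleton xs x ih =>
    rw [List.foldl_append, List.foldl_cons, List.foldl_nil, dedup_append_singleton]
    set d := xs.foldl (outerStep s) PySem.Dict.empty with hd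
    have hnodup : d.keys.Nodup := by
      have hkeys : d.keys = PySem.List.dedup xs := by
        simp only [PySem.Dict.keys, ih, List.map_map]
        rw [show ((fun p : String × PySem.Dict String Int => p.1) ∘ fun w => (w, innerA s w)) = id
          from rfl, List.map_id]
      rw [hkeys]; exact PySem.List.nodup_dedup xs
    have hcont : d.contains x = decide (x ∈ xs) := by
      rw [Bool.eq_iff_iff]
      simp [PySem.Dict.contains, ih, List.any_eq_true]
    by_cases h : x ∈ xs
    · have hc : d.contains x = true := by simp [hcont, h]
      have hgd : d.getD x PySem.Dict.empty = innerA s x := by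
        apply PySem.Dict.getD_of_mem_items d _ hnodup
        rw [ih]; exact List.mem_map_of_mem (by rwa [PySem.List.mem_dedup])
      simp only [outerStep, hc, hgd, h, if_pos]
      by_cases he : (innerA s x).items = []
      · rw [if_pos he]
        simp only [PySem.Dict.insert, hc, if_true, ih, List.map_map]
        refine List.map_congr_left ?_
        intro k _
        by_cases hkx : k = x
        · subst hkx; simp
        · simp [Function.comp, hkx]
      · rw [if_neg he]; exact ih
    · have hc : d.contains x = false := by simp [hcont, h]
      have hc2 : (d.insert x PySem.Dict.empty).contains x = true :=
        PySem.Dict.contains_insert_self _ _ _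
      simp only [outerStep, hc, Bool.false_eq_true, if_false, h]
      rw [PySem.Dict.getD_insert_self,
        if_pos (by rfl : (PySem.Dict.empty : PySem.Dict String Int).items = []),
        PySem.Dict.items_insert_of_contains _ _ hc2,
        PySem.Dict.items_insert_of_not_contains _ _ hc,
        List.map_append, ih, List.map_map, List.map_append]
      congr 1
      · refine List.map_congr_left ?_
        intro k hk
        have hkx : (k == x) = false := by
          rw [PySem.List.mem_dedup] at hk
          simp only [beq_eq_false_iff_ne, ne_eq]
          rintro rfl; exact h hk
        simp [Function.comp, hkx]
      · simp

-- ===== VERDICT (by name: the statement is the Claim_ definition above) =====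
theorem per_sentence_dict_spec : Claim_equal_per_sentence_dict := by
  intro s _
  unfold Spec_per_sentence_dict
  show ((s.foldl (outerStep s) PySem.Dict.empty).items).map (fun p => (p.1, p.2.items))
      = (cnt s).keys.map (fun w => (w, (cnt s).items.filter (fun q => !(q.1 == w))))
  rw [outer_items s s, cnt_keys, List.map_map]
  refine List.map_congr_left ?_
  intro w _
  simp only [Function.comp]
  exact congrArg (fun l => (w, l)) (perword_eq s w)
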